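-- pv_equiv track=rewrite | github.com/august0-m/IP-Guias_y_parciales | python/nuevoArranque.py | min_vocales
-- ===== SOURCE A (Python) =====
-- def min_vocales(palabra:str)->bool:
--     vocales=["A","E","I","O","U","a","e","i","o","u"]
--     res:bool=False
--     contador:int=0
--     for y in range(len(vocales)):
--         for x in range(len(palabra)):
--          if palabra[x]==vocales[y]:
--             contador+=1
--             vocales[y]=""
--     if contador>=3:
--         res=True
--     return res
-- ===== SOURCE B (Python) =====
-- def min_vocales(palabra: str) -> bool:
--     return len(set(palabra) & set("AEIOUaeiou")) >= 3
-- ===== Notes on version B (the rewrite author's own statement) =====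
-- stated objective: idiomatic
-- what changed: Replaced A's nested vowel-over-word double loop (with in-place blanking of matched vowels) by a single set build intersected with the fixed vowel set, returning whether the intersection has at least 3 elements.
import Mathlib
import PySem

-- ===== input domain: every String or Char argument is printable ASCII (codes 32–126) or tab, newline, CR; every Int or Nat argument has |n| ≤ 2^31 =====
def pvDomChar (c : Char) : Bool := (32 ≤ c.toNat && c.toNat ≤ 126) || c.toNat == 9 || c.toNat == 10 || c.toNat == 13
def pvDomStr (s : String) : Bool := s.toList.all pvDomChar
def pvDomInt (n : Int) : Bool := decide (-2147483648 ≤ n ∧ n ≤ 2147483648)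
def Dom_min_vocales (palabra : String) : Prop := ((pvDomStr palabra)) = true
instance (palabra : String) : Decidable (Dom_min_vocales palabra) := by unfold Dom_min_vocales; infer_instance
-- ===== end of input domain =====

-- B replaces A's nested vowel-over-word scan (with in-place blanking of matched vowels) by one
-- set-intersection: len(set(palabra) & set("AEIOUaeiou")) >= 3 — idiomatic, single pass over the word.

-- ===== PORT A =====
-- A keeps vocales as a mutable list of 1-char strings, blanks a vowel ("" ) on first match so it is
-- counted at most once; strings are modelled as List Char per PySem, so "A" is ['A'] and "" is [].
def min_vocales (palabra : String) : Bool :=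
  let vocales : List (List Char) := [['A'],['E'],['I'],['O'],['U'],['a'],['e'],['i'],['o'],['u']]
  let st :=
    (PySem.List.pyRange 0 10).foldl
      (fun (st : List (List Char) × Int) y =>
        (PySem.List.pyRange 0 (PySem.Str.len palabra)).foldl
          (fun (st : List (List Char) × Int) x =>
            if [PySem.List.pyGetD palabra.toList x ' '] = PySem.List.pyGetD st.1 y [] then
              (PySem.List.pySetD st.1 y [], st.2 + 1)
            else st) st)
      (vocales, (0 : Int))
  if st.2 ≥ 3 then true else false

-- ===== PORT B =====
def min_vocales_alt (palabra : String) : Bool :=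
  decide (3 ≤ PySem.Set.len (PySem.Set.inter (PySem.Set.ofList palabra.toList)
      (PySem.Set.ofList "AEIOUaeiou".toList)))

-- ===== PRECONDITION & SPEC =====
def Spec_min_vocales (palabra : String) (out : Bool) : Prop := out = min_vocales_alt palabra
instance (palabra : String) (out : Bool) : Decidable (Spec_min_vocales palabra out) := by unfold Spec_min_vocales; infer_instance

-- ===== CLAIM (what is proved, stated in full; the proofs are below) =====
def Claim_equal_min_vocales : Prop := ∀ (palabra : String), Dom_min_vocales palabra → Spec_min_vocales palabra (min_vocales palabra)

-- ===== LEMMAS AND PROOFS =====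

-- A's inner loop over the word against slot y: it increments once iff slot y's current content is
-- some word character's singleton, and then blanks the slot (so later characters cannot match it).
theorem inner_loop (y : Int) (h0 : 0 ≤ y) (cs : List Char) :
    ∀ (vs : List (List Char)) (c : Int), y.toNat < vs.length →
    cs.foldl (fun (st : List (List Char) × Int) ch =>
        if [ch] = PySem.List.pyGetD st.1 y [] then
          (PySem.List.pySetD st.1 y [], st.2 + 1) else st) (vs, c)
      = if vs.getD y.toNat [] ∈ cs.map (fun ch => [ch]) then (vs.set y.toNat [], c + 1)
        else (vs, c) := by
  induction cs with
  | nil => intro vs c hy; simp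
  | cons ch rest ih =>
    intro vs c hy
    have hget : PySem.List.pyGetD vs y [] = vs.getD y.toNat [] := by
      rw [PySem.List.pyGetD_eq_getElem vs [] h0 (by omega), List.getD_eq_getElem vs [] hy]
    by_cases hc : ([ch] : List Char) = vs.getD y.toNat []
    · simp only [List.foldl_cons, hget, if_pos hc, PySem.List.pySetD_of_nonneg vs [] h0]
      rw [ih (vs.set y.toNat []) (c+1) (by simpa using hy)]
      have hset : (vs.set y.toNat []).getD y.toNat [] = [] := by
        rw [List.getD_eq_getElem _ [] (by simpa using hy)]
        simp [List.getElem_set_self]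
      rw [hset, if_neg (by simp)]
      rw [if_pos (List.mem_map.mpr ⟨ch, List.mem_cons_self .., hc⟩)]
    · simp only [List.foldl_cons, hget, if_neg hc]
      rw [ih vs c hy]
      have hne : vs.getD y.toNat [] ≠ [ch] := fun h => hc h.symm
      simp only [List.map_cons, List.mem_cons]
      rw [if_congr (or_iff_right hne) rfl rfl]


-- A's outer loop over the remaining vowel slots: the counter gains exactly the number of suffix
-- vowels that occur in the word.
theorem outer_loop (cs : List Char) :
    ∀ (V' : List Char) (y : Int) (vs : List (List Char)) (c : Int),
    0 ≤ y → vs.length = y.toNat + V'.length →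
    (∀ k, (h : k < V'.length) → vs.getD (y.toNat + k) [] = [V'[k]]) →
    (((PySem.List.pyRange y (y + V'.length)).foldl
        (fun st yy => cs.foldl (fun (st : List (List Char) × Int) ch =>
          if [ch] = PySem.List.pyGetD st.1 yy [] then
            (PySem.List.pySetD st.1 yy [], st.2 + 1) else st) st)
        (vs, c)).2)
      = c + ((V'.filter (fun v => v ∈ cs)).length : Int) := by
  intro V'
  induction V' with
  | nil =>
    intro y vs c h0 hlen hsuf
    rw [show y + ((List.length []) : Int) = y by simp, PySem.List.pyRange_one_eq_nil le_rfl]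
    simp
  | cons v rest ih =>
    intro y vs c h0 hlen hsuf
    have hb : y + ((v :: rest).length : Int) = (y + 1) + rest.length := by
      simp; ring
    rw [hb, PySem.List.pyRange_one_cons (by omega), List.foldl_cons]
    have hy : y.toNat < vs.length := by simp at hlen; omega
    rw [inner_loop y h0 cs vs c hy]
    have hv0 : vs.getD y.toNat [] = [v] := by
      have := hsuf 0 (by simp)
      simpa using this
    rw [hv0]
    have hsuf' : ∀ (vs' : List (List Char)), vs'.length = vs.length →
        (∀ j, j ≠ y.toNat → vs'.getD j [] = vs.getD j []) →
        ∀ k, (h : k < rest.length) → vs'.getD ((y+1).toNat + k) [] = [rest[k]] := by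
      intro vs' hl hagree k hk
      have hidx : (y+1).toNat + k = y.toNat + (k+1) := by omega
      rw [hidx, hagree _ (by omega)]
      have := hsuf (k+1) (by simpa using Nat.succ_lt_succ hk)
      simpa using this
    by_cases hv : v ∈ cs
    · rw [if_pos (List.mem_map.mpr ⟨v, hv, rfl⟩)]
      rw [ih (y+1) (vs.set y.toNat []) (c+1) (by omega)
          (by simp at hlen ⊢; omega)
          (hsuf' _ (by simp) (fun j hj => by
            rcases Nat.lt_or_ge j vs.length with hjl | hjl
            · rw [List.getD_eq_getElem _ [] (by simpa using hjl),
                 List.getD_eq_getElem _ [] hjl]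
              exact List.getElem_set_ne (by omega) _
            · rw [List.getD_eq_default _ [] (by simpa using hjl),
                 List.getD_eq_default _ [] hjl]))]
      simp [hv]; ring
    · rw [if_neg (fun h => by
        obtain ⟨a, ha, he⟩ := List.mem_map.mp h
        simp only [List.cons.injEq] at he
        exact hv (he.1 ▸ ha))]
      rw [ih (y+1) vs c (by omega) (by simp at hlen ⊢; omega)
          (hsuf' vs rfl (fun _ _ => rfl))]
      simp [hv]


-- Counting elements of a nodup S lying in a nodup T equals the symmetric count (both are |S ∩ T|).
theorem swap_count (S T : List Char) (hS : S.Nodup) (hT : T.Nodup) :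
    (S.filter (fun a => a ∈ T)).length = (T.filter (fun a => a ∈ S)).length := by
  rw [← List.toFinset_card_of_nodup (hS.filter _), ← List.toFinset_card_of_nodup (hT.filter _)]
  rw [List.toFinset_filter, List.toFinset_filter]
  congr 1
  ext a
  simp [List.mem_toFinset, and_comm]


theorem min_vocales_eq_alt (palabra : String) : min_vocales palabra = min_vocales_alt palabra := by
  unfold min_vocales min_vocales_alt
  have hbody : (fun (st : List (List Char) × Int) (y : Int) =>
      (PySem.List.pyRange 0 (PySem.Str.len palabra)).foldl
        (fun (st : List (List Char) × Int) x =>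
          if [PySem.List.pyGetD palabra.toList x ' '] = PySem.List.pyGetD st.1 y [] then
            (PySem.List.pySetD st.1 y [], st.2 + 1) else st) st)
    = (fun (st : List (List Char) × Int) (y : Int) =>
        palabra.toList.foldl
          (fun (st : List (List Char) × Int) ch =>
            if [ch] = PySem.List.pyGetD st.1 y [] then
              (PySem.List.pySetD st.1 y [], st.2 + 1) else st) st) := by
    funext st y
    rw [PySem.Str.len_eq]
    exact PySem.List.foldl_pyRange_zero_pyGetD' palabra.toList ' '
      (fun (st : List (List Char) × Int) ch =>
        if [ch] = PySem.List.pyGetD st.1 y [] then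
          (PySem.List.pySetD st.1 y [], st.2 + 1) else st) st
  simp only [hbody]
  have houter := outer_loop palabra.toList "AEIOUaeiou".toList 0
    [['A'],['E'],['I'],['O'],['U'],['a'],['e'],['i'],['o'],['u']] 0
    (by norm_num) (by decide) (by decide)
  norm_num at houter
  rw [show (("AEIOUaeiou".length : Int)) = 10 by decide] at houter
  rw [houter]
  have hswap := swap_count (PySem.Set.ofList palabra.toList) "AEIOUaeiou".toList
    (PySem.Set.nodup_ofList palabra.toList) (by decide)
  simp only [PySem.Set.len, PySem.Set.inter]
  have hc1 : List.filter (fun x => (PySem.Set.ofList "AEIOUaeiou".toList).contains x)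
        (PySem.Set.ofList palabra.toList)
      = List.filter (fun a => decide (a ∈ "AEIOUaeiou".toList)) (PySem.Set.ofList palabra.toList) :=
    List.filter_congr (fun x _ => by simp [PySem.Set.contains, PySem.Set.mem_ofList])
  have hc2 : List.filter (fun a => decide (a ∈ PySem.Set.ofList palabra.toList)) "AEIOUaeiou".toList
      = List.filter (fun v => decide (v ∈ palabra.toList)) "AEIOUaeiou".toList :=
    List.filter_congr (fun x _ => by simp [PySem.Set.mem_ofList])
  simp only [hc1, hswap, hc2, ge_iff_le]
  generalize (List.filter (fun v => decide (v ∈ palabra.toList)) "AEIOUaeiou".toList).length = n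
  by_cases h : (3:Int) ≤ (n:Int)
  · simp [h]
  · simp [h]

-- ===== VERDICT (by name: the statement is the Claim_ definition above) =====
theorem min_vocales_spec : Claim_equal_min_vocales := by
  intro palabra _
  unfold Spec_min_vocales
  exact min_vocales_eq_alt palabra
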